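-- pv_equiv track=rewrite | github.com/Xkxxc/- | binarySearchRightmost.py | binarysearchReftmost2
-- ===== SOURCE A (Python) =====
-- def binarysearchReftmost2(list,target):
--     i = 0
--     j = len(list) - 1
--     while i <= j:
--         m = (i + j) >> 1
--         if target <= list[m]:
--             j = m - 1
--         else:
--             i = m + 1
--     return j
-- ===== SOURCE B (Python) =====
-- def binarysearchReftmost2(list, target):
--     # Recursion on list segments: carry an offset and the remaining slice instead of
--     # two mutable bounds; empty segment means the answer is just before the offset.
--     def go(off, seg):
--         if not seg:
--             return off - 1
--         k = (len(seg) - 1) // 2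
--         if target <= seg[k]:
--             return go(off, seg[:k])
--         return go(off + k + 1, seg[k + 1:])
--     return go(0, list)
-- ===== Notes on version B (the rewrite author's own statement) =====
-- stated objective: alternative
-- what changed: Replaced the iterative two-bound (i,j) while-loop by a recursion on list slices: a helper carries an offset and the remaining segment, splits the segment at its midpoint, and returns offset-1 on the empty segment.
import Mathlib
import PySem

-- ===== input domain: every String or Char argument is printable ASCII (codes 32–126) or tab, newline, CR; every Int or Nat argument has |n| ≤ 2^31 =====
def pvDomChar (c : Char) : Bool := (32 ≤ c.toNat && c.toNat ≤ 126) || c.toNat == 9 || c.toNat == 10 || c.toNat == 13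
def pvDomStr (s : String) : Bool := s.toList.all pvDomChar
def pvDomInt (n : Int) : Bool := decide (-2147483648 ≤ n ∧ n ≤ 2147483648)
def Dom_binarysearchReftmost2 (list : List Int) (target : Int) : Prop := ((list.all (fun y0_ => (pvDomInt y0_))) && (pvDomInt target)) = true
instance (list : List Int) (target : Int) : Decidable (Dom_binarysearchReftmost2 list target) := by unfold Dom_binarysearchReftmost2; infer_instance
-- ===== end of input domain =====

-- B replaces A's iterative two-bound while-loop by a recursion on list slices carrying an
-- offset (objective: alternative decomposition; same comparisons, same result).

-- ===== PORT A =====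
-- A's while-loop as tail recursion over the mutable state pair (i, j); the loop body updates
-- one component and loops, and the function returns j once i > j.  `list[m]` is ported with
-- pyGetD: from the entry state (0, len-1) every reached m satisfies i ≤ m ≤ j < len with
-- 0 ≤ i, so the index is always in range and the default is never used (A never raises).
-- Python's `(i + j) >> 1` on ints is exactly floor division by 2.
def pvLoopA (list : List Int) (target : Int) : Int × Int → Int
  | (i, j) =>
    if h : i ≤ j then
      let m := PySem.Int.floordiv (i + j) 2
      if target ≤ PySem.List.pyGetD list m 0 then
        pvLoopA list target (i, m - 1)
      else
        pvLoopA list target (m + 1, j)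
    else j
termination_by s => (s.2 - s.1 + 1).toNat
decreasing_by
  all_goals
    have hm := PySem.Int.floordiv_two_mid_bounds h
    omega

def binarysearchReftmost2 (list : List Int) (target : Int) : Int :=
  pvLoopA list target (0, (list.length : Int) - 1)

-- ===== PORT B =====
-- B's helper go(off, seg): empty segment returns off - 1; otherwise split the segment at its
-- midpoint k = (len(seg)-1)//2 (Nat division = Python // on these nonnegative ints) and
-- recurse on the left slice seg[:k] (= take k) or the right slice seg[k+1:] (= drop (k+1)).
-- seg[k] is in range by construction, so pyGetD's default is never used.
def pvGoB (target : Int) (off : Int) (seg : List Int) : Int :=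
  if seg.isEmpty then off - 1
  else
    let k := (seg.length - 1) / 2
    if target ≤ PySem.List.pyGetD seg (k : Int) 0 then
      pvGoB target off (seg.take k)
    else
      pvGoB target (off + (k : Int) + 1) (seg.drop (k + 1))
termination_by seg.length
decreasing_by
  · have : seg.length ≠ 0 := by simpa [List.isEmpty_iff_length_eq_zero] using ‹¬ seg.isEmpty = true›
    simp [List.length_take]; omega
  · have : seg.length ≠ 0 := by simpa [List.isEmpty_iff_length_eq_zero] using ‹¬ seg.isEmpty = true›
    simp [List.length_drop]; omega

def binarysearchReftmost2_alt (list : List Int) (target : Int) : Int :=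
  pvGoB target 0 list

-- ===== PRECONDITION & SPEC =====
def Spec_binarysearchReftmost2 (list : List Int) (target : Int) (out : Int) : Prop := out = binarysearchReftmost2_alt list target
instance (list : List Int) (target : Int) (out : Int) : Decidable (Spec_binarysearchReftmost2 list target out) := by unfold Spec_binarysearchReftmost2; infer_instance

-- ===== CLAIM (what is proved, stated in full; the proofs are below) =====
def Claim_equal_binarysearchReftmost2 : Prop := ∀ (list : List Int) (target : Int), Dom_binarysearchReftmost2 list target → Spec_binarysearchReftmost2 list target (binarysearchReftmost2 list target)

-- ===== LEMMAS AND PROOFS =====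

-- Bridge: A's loop on the interval [i, j] computes what B's recursion computes on the
-- segment list[i..j] with offset i.  The reachable states satisfy 0 ≤ i, i - 1 ≤ j < len.
lemma pvLoopA_eq_pvGoB (list : List Int) (target : Int) :
    ∀ n i j, (j - i + 1).toNat ≤ n → 0 ≤ i → i - 1 ≤ j → j < (list.length : Int) →
      pvLoopA list target (i, j) = pvGoB target i ((list.drop i.toNat).take (j + 1 - i).toNat) := by
  intro n
  induction n with
  | zero =>
      intro i j hn hi hij hj
      have hji : j = i - 1 := by omega
      rw [pvLoopA, pvGoB]
      simp [hji, show ¬ (i ≤ i - 1) by omega]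
  | succ n ih =>
      intro i j hn hi hij hj
      by_cases hle : i ≤ j
      · have hmb := PySem.Int.floordiv_two_mid_bounds hle
        set m := PySem.Int.floordiv (i + j) 2 with hm
        set seg := (list.drop i.toNat).take (j + 1 - i).toNat with hseg
        have hlen : seg.length = (j + 1 - i).toNat := by
          simp [hseg, List.length_take, List.length_drop]; omega
        have hne : seg.isEmpty = false := by
          have h1 : seg.length ≠ 0 := by rw [hlen]; omega
          simpa using h1
        have hkm : ((seg.length - 1) / 2 : Nat) = (m - i).toNat := by
          have h2 : m * 2 ≤ i + j ∧ i + j < (m + 1) * 2 :=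
            (PySem.Int.floordiv_eq_iff_of_pos (by omega)).mp hm.symm
          omega
        have hget : PySem.List.pyGetD seg (((m - i).toNat : Nat) : Int) 0
            = PySem.List.pyGetD list m 0 := by
          rw [PySem.List.pyGetD_natCast]
          have hidx : (m - i).toNat < seg.length := by omega
          rw [List.getD_eq_getElem _ _ hidx]
          rw [PySem.List.pyGetD_eq_getElem list 0 (by omega) (by omega)]
          simp only [hseg, List.getElem_take, List.getElem_drop]
          congr 1
          omega
        rw [pvLoopA, pvGoB]
        simp only [hne, Bool.false_eq_true, if_false, dif_pos hle, ← hm]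
        rw [hkm, hget]
        split
        · -- left branch: interval [i, m-1], segment seg.take k
          rw [ih i (m - 1) (by omega) hi (by omega) (by omega)]
          congr 1
          rw [hseg, List.take_take]
          congr 1
          omega
        · -- right branch: interval [m+1, j], segment seg.drop (k+1)
          rw [ih (m + 1) j (by omega) (by omega) (by omega) hj]
          congr 1
          · omega
          · rw [hseg, List.drop_take, List.drop_drop]
            congr 1
            · omega
            · congr 1
              omega
      · have hji : j = i - 1 := by omega
        rw [pvLoopA, pvGoB]
        simp [hji, show ¬ (i ≤ i - 1) by omega]

-- ===== VERDICT (by name: the statement is the Claim_ definition above) =====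
theorem binarysearchReftmost2_spec : Claim_equal_binarysearchReftmost2 := by
  intro list target _
  unfold Spec_binarysearchReftmost2 binarysearchReftmost2 binarysearchReftmost2_alt
  have := pvLoopA_eq_pvGoB list target ((list.length : Int) - 0 + 1).toNat 0
    ((list.length : Int) - 1) (by omega) (by omega) (by omega) (by omega)
  simpa [List.take_of_length_le] using this
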